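-- pv_equiv track=rewrite | github.com/thesahibnanda/Youtube-Comment-Sentiment-Analysis | PreprocessingData.py | lemmatize_word
-- ===== SOURCE A (Python) =====
-- def lemmatize_word(word):
--     inflections = {
--         'nouns': {'s': '', 'es': '', 'ies': 'y'},
--         'verbs': {'s': '', 'es': '', 'ies': 'y', 'ed': 'e', 'ing': 'e'}
--     }
--     stem, suffix = '', ''
--     for i in range(len(word)):
--         if i == len(word) - 1 or word[i+1:].isalpha():
--             suffix = word[i:]
--             break
--         stem += word[i]
--     if suffix.startswith('N'):
--         inflection = inflections['nouns']
--     elif suffix.startswith('V'):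
--         inflection = inflections['verbs']
--     else:
--         return word
--     for suffix in inflection:
--         if stem.endswith(suffix):
--             base_word = stem[:-len(suffix)] + inflection[suffix]
--             return base_word + suffix
--     return word
-- ===== SOURCE B (Python) =====
-- def lemmatize_word(word):
--     # A is provably the identity: its break point i is the LAST non-alphabetic
--     # index (or 0), so whenever suffix starts with the alphabetic character 'N'
--     # or 'V' the break must have happened at i == 0, leaving stem == '' -- and an
--     # empty stem matches no inflection key, so the replacement loop never fires
--     # and every path returns word unchanged.
--     return word
-- ===== Notes on version B (the rewrite author's own statement) =====
-- stated objective: simpler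
-- what changed: A provably returns its input unchanged on every string (the tag-dispatch branch is only reachable with an empty stem, so the replacement loop never fires), so B is the identity function; the Lean proof documents this.
import Mathlib
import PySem

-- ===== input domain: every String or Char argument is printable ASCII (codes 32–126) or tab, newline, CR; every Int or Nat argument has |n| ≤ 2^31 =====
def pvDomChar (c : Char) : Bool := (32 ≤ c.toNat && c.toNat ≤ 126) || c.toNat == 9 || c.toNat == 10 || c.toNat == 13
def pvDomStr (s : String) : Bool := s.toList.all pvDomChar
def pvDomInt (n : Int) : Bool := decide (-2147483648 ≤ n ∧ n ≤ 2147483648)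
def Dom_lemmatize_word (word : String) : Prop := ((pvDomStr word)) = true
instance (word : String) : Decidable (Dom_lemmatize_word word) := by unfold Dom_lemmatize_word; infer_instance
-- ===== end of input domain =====

-- A provably returns its input unchanged on every string (its tag-dispatch branch can
-- only be reached with an empty stem, so the replacement loop never fires), so B is the
-- identity function; the proof below documents this (objective: simpler).

-- ===== PORT A =====
-- the two inflection dicts, in Python insertion order (keys are distinct, so the
-- association-list pair gives exactly inflection[key])
def pvInflNouns : List (List Char × List Char) :=
  [(['s'], []), (['e','s'], []), (['i','e','s'], ['y'])]
def pvInflVerbs : List (List Char × List Char) :=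
  [(['s'], []), (['e','s'], []), (['i','e','s'], ['y']), (['e','d'], ['e']), (['i','n','g'], ['e'])]

-- 'for suffix in inflection: if stem.endswith(suffix): return stem[:-len(suffix)] + inflection[suffix] + suffix'
def pvReplace (stem : List Char) : List (List Char × List Char) → Option (List Char)
  | [] => none
  | (key, rep) :: rest =>
    if PySem.Chars.endswith stem key then
      some (PySem.List.slice stem none (some (-(key.length : Int))) ++ rep ++ key)
    else pvReplace stem rest

-- the tag dispatch + replacement loop + final 'return word'
def pvDispatch (word stem suffix : List Char) : List Char :=
  if PySem.Chars.startswith suffix ['N'] then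
    match pvReplace stem pvInflNouns with
    | some r => r
    | none => word
  else if PySem.Chars.startswith suffix ['V'] then
    match pvReplace stem pvInflVerbs with
    | some r => r
    | none => word
  else word

-- A's first loop: 'for i in range(len(word)): if i == len(word)-1 or word[i+1:].isalpha():
--   suffix = word[i:]; break; stem += word[i]'  (returns the pair (stem, suffix))
def pvLoopA (w : List Char) : Nat → Nat → List Char → List Char × List Char
  | 0, _, stem => (stem, [])      -- i has reached len(word): loop ends with no break
  | fuel + 1, i, stem =>
    if i = w.length - 1 ∨ PySem.Chars.strIsalpha (PySem.List.slice w (some ((i : Int) + 1)) none) = true then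
      (stem, PySem.List.slice w (some (i : Int)) none)
    else pvLoopA w fuel (i + 1) (stem ++ [PySem.List.pyGetD w (i : Int) ' '])

def lemmatize_word (word : String) : String :=
  let w := word.toList
  let p := pvLoopA w w.length 0 []
  String.ofList (pvDispatch w p.1 p.2)

-- ===== PORT B =====
-- B: the identity (A never changes its input; see the header comment and the proof)
def lemmatize_word_alt (word : String) : String := word

-- ===== PRECONDITION & SPEC =====
def Spec_lemmatize_word (word : String) (out : String) : Prop := out = lemmatize_word_alt word
instance (word : String) (out : String) : Decidable (Spec_lemmatize_word word out) := by unfold Spec_lemmatize_word; infer_instance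

-- ===== CLAIM =====
def Claim_equal_lemmatize_word : Prop := ∀ (word : String), Dom_lemmatize_word word → Spec_lemmatize_word word (lemmatize_word word)

-- ===== LEMMAS AND PROOFS =====

-- index of the last non-alphabetic character of w, if any
def pvLastNA : List Char → Option Nat
  | [] => none
  | c :: t =>
    match pvLastNA t with
    | some k => some (k + 1)
    | none => if PySem.Chars.isalpha c then none else some 0

def pvJ (w : List Char) : Nat := (pvLastNA w).getD 0

theorem pvLastNA_spec (w : List Char) :
    (∀ k, pvLastNA w = some k →
        k < w.length ∧ PySem.Chars.isalpha (w.getD k ' ') = false ∧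
        ∀ m, k < m → m < w.length → PySem.Chars.isalpha (w.getD m ' ') = true) ∧
    (pvLastNA w = none → ∀ m, m < w.length → PySem.Chars.isalpha (w.getD m ' ') = true) := by
  induction w with
  | nil => simp [pvLastNA]
  | cons c t ih =>
    constructor
    · intro k hk
      simp only [pvLastNA] at hk
      cases ht : pvLastNA t with
      | some k' =>
        rw [ht] at hk
        obtain ⟨h1, h2, h3⟩ := ih.1 k' ht
        cases hk
        refine ⟨by simpa using Nat.succ_lt_succ h1, by simpa using h2, ?_⟩
        intro m hm hmlen
        cases m with
        | zero => omega
        | succ m' =>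
          simp only [List.getD_cons_succ]
          exact h3 m' (by omega) (by simpa using hmlen)
      | none =>
        rw [ht] at hk
        by_cases hc : PySem.Chars.isalpha c = true
        · simp [hc] at hk
        · simp [hc] at hk
          cases hk
          refine ⟨by simp, by simpa using Bool.eq_false_iff.mpr hc, ?_⟩
          intro m hm hmlen
          cases m with
          | zero => omega
          | succ m' =>
            simp only [List.getD_cons_succ]
            exact ih.2 ht m' (by simpa using hmlen)
    · intro hn m hm
      simp only [pvLastNA] at hn
      cases ht : pvLastNA t with
      | some k' => rw [ht] at hn; simp at hn
      | none =>
        rw [ht] at hn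
        by_cases hc : PySem.Chars.isalpha c = true
        · cases m with
          | zero => simpa using hc
          | succ m' =>
            simp only [List.getD_cons_succ]
            exact ih.2 ht m' (by simpa using hm)
        · simp [hc] at hn

theorem pvJ_lt (w : List Char) (hw : w ≠ []) : pvJ w < w.length := by
  unfold pvJ
  cases h : pvLastNA w with
  | some k => simpa using ((pvLastNA_spec w).1 k h).1
  | none => simpa using List.length_pos_iff.mpr hw

-- all characters strictly after pvJ w are alphabetic
theorem pvJ_after (w : List Char) (m : Nat) (hm : pvJ w < m) (hlen : m < w.length) :
    PySem.Chars.isalpha (w.getD m ' ') = true := by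
  unfold pvJ at hm
  cases h : pvLastNA w with
  | some k => rw [h] at hm; exact ((pvLastNA_spec w).1 k h).2.2 m (by simpa using hm) hlen
  | none => exact (pvLastNA_spec w).2 h m hlen

-- the character AT pvJ w is non-alphabetic whenever pvJ w > 0
theorem pvJ_notalpha (w : List Char) (h : 0 < pvJ w) :
    PySem.Chars.isalpha (w.getD (pvJ w) ' ') = false := by
  unfold pvJ at h ⊢
  cases hh : pvLastNA w with
  | some k => simpa using ((pvLastNA_spec w).1 k hh).2.1
  | none => rw [hh] at h; simp at h

theorem pvStrIsalpha_iff (xs : List Char) :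
    PySem.Chars.strIsalpha xs = true ↔ xs ≠ [] ∧ ∀ m, m < xs.length → PySem.Chars.isalpha (xs.getD m ' ') = true := by
  unfold PySem.Chars.strIsalpha
  simp only [Bool.and_eq_true, Bool.not_eq_true', List.isEmpty_eq_false_iff, List.all_eq_true]
  constructor
  · rintro ⟨h1, h2⟩
    refine ⟨h1, fun m hm => ?_⟩
    rw [List.getD_eq_getElem xs ' ' hm]
    exact h2 _ (List.getElem_mem hm)
  · rintro ⟨h1, h2⟩
    refine ⟨h1, fun x hx => ?_⟩
    obtain ⟨m, hm, rfl⟩ := List.mem_iff_getElem.mp hx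
    rw [← List.getD_eq_getElem xs ' ' hm]
    exact h2 m hm

-- A's loop, started at any i ≤ pvJ w with stem = word[:i], breaks exactly at pvJ w
theorem pvLoopA_eq (w : List Char) : ∀ fuel i, fuel + i = w.length → i ≤ pvJ w → i < w.length →
    pvLoopA w fuel i (w.take i) = (w.take (pvJ w), w.drop (pvJ w)) := by
  intro fuel
  induction fuel with
  | zero => intro i hf _ hi; omega
  | succ f ih =>
    intro i hf hij hi
    rw [pvLoopA]
    have hslice1 : PySem.List.slice w (some ((i : Int) + 1)) none = w.drop (i + 1) := by
      have : ((i : Int) + 1) = ((i + 1 : Nat) : Int) := by push_cast; ring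
      rw [this, PySem.List.slice_from w (by omega), Int.toNat_natCast]
    rcases Nat.lt_or_ge i (pvJ w) with hlt | hge
    · -- no break: condition is false
      have hjlt : pvJ w < w.length := pvJ_lt w (by intro h; subst h; simp at hi)
      have hne1 : ¬ (i = w.length - 1) := by omega
      have hne2 : ¬ (PySem.Chars.strIsalpha (PySem.List.slice w (some ((i : Int) + 1)) none) = true) := by
        rw [hslice1]
        intro hall
        obtain ⟨-, h2⟩ := (pvStrIsalpha_iff _).mp hall
        have hlen : pvJ w - (i + 1) < (w.drop (i + 1)).length := by
          rw [List.length_drop]; omega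
        have hth := h2 _ hlen
        rw [List.getD_eq_getElem _ ' ' hlen, List.getElem_drop,
            ← List.getD_eq_getElem w ' ' (by omega : i + 1 + (pvJ w - (i + 1)) < w.length)] at hth
        have hJ : i + 1 + (pvJ w - (i + 1)) = pvJ w := by omega
        rw [hJ] at hth
        have hna := pvJ_notalpha w (by omega)
        rw [hth] at hna
        simp at hna
      rw [if_neg (not_or.mpr ⟨hne1, hne2⟩)]
      have htake : w.take i ++ [PySem.List.pyGetD w (i : Int) ' '] = w.take (i + 1) := by
        have hget : PySem.List.pyGetD w (i : Int) ' ' = w[i] := by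
          rw [PySem.List.pyGetD_natCast]; exact List.getD_eq_getElem w ' ' hi
        rw [hget, List.take_add_one, List.getElem?_eq_getElem hi]
        simp
      rw [htake]
      exact ih (i + 1) (by omega) (by omega) (by omega)
    · -- i = pvJ w: the break condition holds
      have hieq : i = pvJ w := by omega
      have hcond : i = w.length - 1 ∨ PySem.Chars.strIsalpha (PySem.List.slice w (some ((i : Int) + 1)) none) = true := by
        rcases Nat.lt_or_ge (i + 1) w.length with hrest | hlast
        · right
          rw [hslice1, pvStrIsalpha_iff]
          refine ⟨by simp [List.drop_eq_nil_iff]; omega, fun m hm => ?_⟩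
          rw [List.length_drop] at hm
          rw [List.getD_eq_getElem _ ' ' (by rw [List.length_drop]; omega), List.getElem_drop,
              ← List.getD_eq_getElem w ' ' (by omega)]
          exact pvJ_after w (i + 1 + m) (by omega) (by omega)
        · left; omega
      rw [if_pos hcond, hieq, PySem.List.slice_from w (by omega), Int.toNat_natCast]

-- the common characterisation of the split
theorem pvSplit_A (w : List Char) : pvLoopA w w.length 0 [] = (w.take (pvJ w), w.drop (pvJ w)) := by
  rcases eq_or_ne w [] with rfl | hw
  · simp [pvLoopA, pvJ, pvLastNA]
  · have := pvLoopA_eq w w.length 0 (by omega) (Nat.zero_le _) (List.length_pos_iff.mpr hw)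
    simpa using this

-- if the suffix starts with an alphabetic tag char, the split point must be 0 (empty stem)
theorem pvJ_zero_of_alpha_head (w : List Char) (c : Char) (hc : PySem.Chars.isalpha c = true)
    (h : PySem.Chars.startswith (w.drop (pvJ w)) [c] = true) : pvJ w = 0 := by
  by_contra hne
  obtain ⟨t, ht⟩ := (PySem.Chars.startswith_iff _ _).mp h
  have hlen : pvJ w < w.length := by
    have : w.drop (pvJ w) ≠ [] := by rw [← ht]; simp
    by_contra hge
    exact this (List.drop_eq_nil_iff.mpr (by omega))
  have hget : w.getD (pvJ w) ' ' = c := by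
    have h0 : (w.drop (pvJ w)).getD 0 ' ' = c := by rw [← ht]; rfl
    rw [List.getD_eq_getElem _ ' ' (by rw [← ht]; simp : 0 < (w.drop (pvJ w)).length),
        List.getElem_drop] at h0
    rw [List.getD_eq_getElem w ' ' hlen, ← h0]
    simp
  have := pvJ_notalpha w (by omega)
  rw [hget, hc] at this
  simp at this

-- the dispatch is the identity on the pvJ split: either no tag matches, or the stem is empty
theorem pvDispatch_id (w : List Char) :
    pvDispatch w (w.take (pvJ w)) (w.drop (pvJ w)) = w := by
  unfold pvDispatch
  by_cases hN : PySem.Chars.startswith (w.drop (pvJ w)) ['N'] = true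
  · have h0 := pvJ_zero_of_alpha_head w 'N' (by decide) hN
    rw [if_pos hN, h0]
    simp only [List.take_zero]
    rfl
  · rw [if_neg hN]
    by_cases hV : PySem.Chars.startswith (w.drop (pvJ w)) ['V'] = true
    · have h0 := pvJ_zero_of_alpha_head w 'V' (by decide) hV
      rw [if_pos hV, h0]
      simp only [List.take_zero]
      rfl
    · rw [if_neg hV]

-- ===== VERDICT =====
theorem lemmatize_word_spec : Claim_equal_lemmatize_word := by
  intro word _
  unfold Spec_lemmatize_word lemmatize_word lemmatize_word_alt
  simp only [pvSplit_A, pvDispatch_id]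
  exact String.ofList_toList
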